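-- pv_equiv track=rewrite | github.com/vieiraroger/computer-graphics-math | angle.py | angle_to_radians
-- ===== SOURCE A (Python) =====
-- def angle_to_radians(angle):
--     '''
--     Only integer angle
--     '''
--     numerator = angle
--     denominator = 180
--     for i in reversed(range(1, 180)):
--         if(numerator%i == 0 and denominator%i == 0):
--             numerator = int(numerator/i)
--             denominator = int(denominator/i)
--             return str(numerator) + "P/" + str(denominator)
-- ===== SOURCE B (Python) =====
-- import math
--
--
-- def angle_to_radians(angle):
--     '''
--     Only integer angle
--     '''
--     g = math.gcd(angle, 180)
--     return str(angle // g) + "P/" + str(180 // g)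
-- ===== Notes on version B (the rewrite author's own statement) =====
-- stated objective: idiomatic
-- what changed: Replaces the 179-step descending divisor scan with a single math.gcd call and one division, fully reducing the fraction.
-- intended difference: On angles that are multiples of 180 (including 0) A's loop stops at 179 so it only divides by 90 and returns the unreduced fraction str(angle/90)+'P/2', while B fully reduces by gcd=180 and returns str(angle/180)+'P/1', the intended reduced form (e.g. 360 -> A '4P/2', B '2P/1'). — e.g. on angle_to_radians(360): A returns "4P/2", B returns "2P/1"
import Mathlib
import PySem

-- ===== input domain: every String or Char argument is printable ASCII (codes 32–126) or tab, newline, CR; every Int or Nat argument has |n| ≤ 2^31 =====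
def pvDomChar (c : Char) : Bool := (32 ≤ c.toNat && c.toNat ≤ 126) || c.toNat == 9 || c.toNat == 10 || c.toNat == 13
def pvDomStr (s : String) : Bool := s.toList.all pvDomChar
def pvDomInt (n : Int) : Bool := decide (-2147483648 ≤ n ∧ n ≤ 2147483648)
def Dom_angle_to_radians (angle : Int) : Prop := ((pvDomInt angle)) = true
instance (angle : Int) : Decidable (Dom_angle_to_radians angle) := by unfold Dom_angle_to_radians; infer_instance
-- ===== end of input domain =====

-- B replaces A's 179-step descending divisor scan by a single gcd and one division
-- (idiomatic; it fully reduces the fraction, which differs from A exactly on multiples of 180 — see D_ below).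

-- ===== PORT A =====
-- 'for i in reversed(range(1, 180))' iterates i = 179, 178, …, 1: ported as a countdown
-- recursion (fuel n+1 means current i = n+1); 'int(numerator/i)' is PySem.Int.truncdiv
-- (exact for |angle| ≤ 2^31 < 2^53). The loop always returns at i = 1, so the Python
-- function never falls through; the '.getD ""' default for the empty-fuel case is unreachable.
def angleLoopA (angle : Int) : Nat → Option String
  | 0 => none
  | n + 1 =>
    let i : Int := ((n + 1 : Nat) : Int)
    if PySem.Int.mod angle i = 0 ∧ PySem.Int.mod (180 : Int) i = 0 then
      some (PySem.Int.toStr (PySem.Int.truncdiv angle i) ++ "P/" ++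
            PySem.Int.toStr (PySem.Int.truncdiv (180 : Int) i))
    else
      angleLoopA angle n

def angle_to_radians (angle : Int) : String :=
  (angleLoopA angle 179).getD ""

-- ===== PORT B =====
-- math.gcd(angle, 180) is Int.gcd (nonnegative gcd of absolute values); 'angle // g' is floordiv.
def angle_to_radians_alt (angle : Int) : String :=
  let g : Int := ((Int.gcd angle 180 : Nat) : Int)
  PySem.Int.toStr (PySem.Int.floordiv angle g) ++ "P/" ++
    PySem.Int.toStr (PySem.Int.floordiv (180 : Int) g)

-- ===== PRECONDITION & SPEC =====
-- On multiples of 180 (including 0) A's loop bound 179 makes it stop at divisor 90 and return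
-- the unreduced 'str(angle/90)P/2', while B fully reduces by gcd = 180 and returns the intended
-- 'str(angle/180)P/1' (e.g. 360: A '4P/2', B '2P/1').
def D_angle_to_radians (angle : Int) : Prop := (180 : Int) ∣ angle
instance (angle : Int) : Decidable (D_angle_to_radians angle) := by unfold D_angle_to_radians; infer_instance

def Spec_angle_to_radians (angle : Int) (out : String) : Prop :=
  ¬ D_angle_to_radians angle → out = angle_to_radians_alt angle
instance (angle : Int) (out : String) : Decidable (Spec_angle_to_radians angle out) := by unfold Spec_angle_to_radians; infer_instance

def pvDiffWitness_angle_to_radians : Int := 360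
def pvDiffWitnessOut_angle_to_radians : String × String := ("4P/2", "2P/1")

-- ===== CLAIM (what is proved, stated in full; the proofs are below) =====
def Claim_unchanged_angle_to_radians : Prop := ∀ (angle : Int), Dom_angle_to_radians angle → Spec_angle_to_radians angle (angle_to_radians angle)
def Claim_changed_angle_to_radians : Prop := Dom_angle_to_radians (pvDiffWitness_angle_to_radians) ∧ D_angle_to_radians (pvDiffWitness_angle_to_radians) ∧ angle_to_radians (pvDiffWitness_angle_to_radians) = pvDiffWitnessOut_angle_to_radians.1 ∧ angle_to_radians_alt (pvDiffWitness_angle_to_radians) = pvDiffWitnessOut_angle_to_radians.2 ∧ pvDiffWitnessOut_angle_to_radians.1 ≠ pvDiffWitnessOut_angle_to_radians.2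
def Claim_exact_angle_to_radians : Prop := ∀ (angle : Int), Dom_angle_to_radians angle → D_angle_to_radians angle → angle_to_radians angle ≠ angle_to_radians_alt angle

-- ===== LEMMAS AND PROOFS =====

-- A's loop, run with fuel n ≥ g, returns the result for divisor g when g matches and no
-- larger i ≤ n matches.
theorem angleLoopA_first (angle : Int) (g : Nat) (hg1 : 1 ≤ g)
    (hcg : PySem.Int.mod angle (g : Int) = 0 ∧ PySem.Int.mod (180 : Int) (g : Int) = 0) :
    ∀ n : Nat, g ≤ n →
      (∀ i : Nat, g < i → i ≤ n →
        ¬ (PySem.Int.mod angle (i : Int) = 0 ∧ PySem.Int.mod (180 : Int) (i : Int) = 0)) →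
      angleLoopA angle n =
        some (PySem.Int.toStr (PySem.Int.truncdiv angle (g : Int)) ++ "P/" ++
              PySem.Int.toStr (PySem.Int.truncdiv (180 : Int) (g : Int))) := by
  intro n
  induction n with
  | zero => intro h; omega
  | succ m ih =>
    intro hle hno
    by_cases hgm : g = m + 1
    · subst hgm
      simp only [angleLoopA, if_pos hcg]
    · have hlt : g ≤ m := by omega
      have hfail := hno (m + 1) (by omega) (le_refl _)
      simp only [angleLoopA, if_neg hfail]
      exact ih hlt (fun i h1 h2 => hno i h1 (by omega))

-- exact division: truncating and flooring division agree
theorem tdiv_eq_fdiv_of_dvd (a b : Int) (hb : b ≠ 0) (h : b ∣ a) :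
    PySem.Int.truncdiv a b = PySem.Int.floordiv a b := by
  obtain ⟨k, rfl⟩ := h
  simp [PySem.Int.truncdiv, PySem.Int.floordiv, Int.mul_tdiv_cancel_left _ hb,
        Int.mul_fdiv_cancel_left _ hb]

theorem mod_zero_of_dvd (a : Int) (i : Nat) (h : (i : Int) ∣ a) :
    PySem.Int.mod a (i : Int) = 0 := (PySem.Int.mod_eq_zero_iff_dvd a i).mpr h

-- When 180 ∤ angle, A's loop first matches at i = gcd(angle, 180).
theorem angle_to_radians_eq_of_not_dvd (angle : Int) (hnd : ¬ (180 : Int) ∣ angle) :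
    angle_to_radians angle = angle_to_radians_alt angle := by
  set g : Nat := Int.gcd angle 180 with hgdef
  have hgpos : 0 < g := Int.gcd_pos_iff.mpr (Or.inr (by norm_num))
  have hdl : (g : Int) ∣ angle := Int.gcd_dvd_left angle 180
  have hdr : (g : Int) ∣ (180 : Int) := Int.gcd_dvd_right angle 180
  have hg180 : g ∣ 180 := by exact_mod_cast hdr
  have hgle : g ≤ 180 := Nat.le_of_dvd (by norm_num) hg180
  have hgne : g ≠ 180 := by
    intro h
    exact hnd (by rw [h] at hdl; exact_mod_cast hdl)
  have hcg : PySem.Int.mod angle (g : Int) = 0 ∧ PySem.Int.mod (180 : Int) (g : Int) = 0 :=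
    ⟨mod_zero_of_dvd _ _ hdl, mod_zero_of_dvd _ _ hdr⟩
  have hno : ∀ i : Nat, g < i → i ≤ 179 →
      ¬ (PySem.Int.mod angle (i : Int) = 0 ∧ PySem.Int.mod (180 : Int) (i : Int) = 0) := by
    intro i hgi _ ⟨h1, h2⟩
    have d1 : (i : Int) ∣ angle := (PySem.Int.mod_eq_zero_iff_dvd _ _).mp h1
    have d2 : (i : Int) ∣ (180 : Int) := (PySem.Int.mod_eq_zero_iff_dvd _ _).mp h2
    have : i ∣ g := Int.dvd_gcd d1 d2
    have := Nat.le_of_dvd hgpos this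
    omega
  have hrun := angleLoopA_first angle g hgpos hcg 179 (by omega) hno
  rw [angle_to_radians, hrun]
  rw [angle_to_radians_alt]
  simp only [Option.getD_some]
  rw [tdiv_eq_fdiv_of_dvd angle (g : Int) (by exact_mod_cast hgpos.ne') hdl,
      tdiv_eq_fdiv_of_dvd (180 : Int) (g : Int) (by exact_mod_cast hgpos.ne') hdr]

-- When 180 ∣ angle, A's loop first matches at i = 90 …
theorem angle_to_radians_eq_of_dvd (angle : Int) (hd : (180 : Int) ∣ angle) :
    angle_to_radians angle =
      PySem.Int.toStr (PySem.Int.truncdiv angle 90) ++ "P/" ++ "2" := by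
  have h90 : ((90 : Nat) : Int) ∣ angle := dvd_trans (by norm_num) hd
  have hcg : PySem.Int.mod angle ((90 : Nat) : Int) = 0 ∧
      PySem.Int.mod (180 : Int) ((90 : Nat) : Int) = 0 :=
    ⟨mod_zero_of_dvd _ _ h90, by decide⟩
  have hno : ∀ i : Nat, 90 < i → i ≤ 179 →
      ¬ (PySem.Int.mod angle (i : Int) = 0 ∧ PySem.Int.mod (180 : Int) (i : Int) = 0) := by
    intro i hgi hle ⟨_, h2⟩
    have d2 : (i : Int) ∣ (180 : Int) := (PySem.Int.mod_eq_zero_iff_dvd _ _).mp h2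
    have hi : i ∣ 180 := by exact_mod_cast d2
    obtain ⟨k, hk⟩ := hi
    rcases Nat.lt_or_ge k 2 with hk2 | hk2
    · interval_cases k <;> omega
    · nlinarith
  have hrun := angleLoopA_first angle 90 (by norm_num) hcg 179 (by norm_num) hno
  rw [angle_to_radians, hrun, Option.getD_some]
  congr 1

-- … while B fully reduces by gcd = 180.
theorem angle_to_radians_alt_eq_of_dvd (angle : Int) (hd : (180 : Int) ∣ angle) :
    angle_to_radians_alt angle =
      PySem.Int.toStr (PySem.Int.floordiv angle 180) ++ "P/" ++ "1" := by
  have hg : Int.gcd angle 180 = 180 := by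
    have h1 : Int.gcd angle 180 ∣ 180 := by
      exact_mod_cast Int.gcd_dvd_right angle (180 : Int)
    have h2 : (180 : Nat) ∣ Int.gcd angle 180 := Int.dvd_gcd hd (by norm_num)
    exact Nat.dvd_antisymm h1 h2
  rw [angle_to_radians_alt, hg]
  congr 1

-- distinct last characters make the two strings distinct
theorem append_ne_of_last_ne (s t : String) : s ++ "P/" ++ "2" ≠ t ++ "P/" ++ "1" := by
  intro h
  have h2 : (s ++ "P/" ++ "2").toList = (t ++ "P/" ++ "1").toList := by rw [h]
  simp only [String.toList_append] at h2
  have := congrArg List.getLast? h2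
  simp [List.getLast?_append] at this

-- ===== VERDICT (by name: the statement is the Claim_ definition above) =====
theorem angle_to_radians_spec : Claim_unchanged_angle_to_radians := by
  intro angle _ hnd
  exact angle_to_radians_eq_of_not_dvd angle hnd

theorem angle_to_radians_changed : Claim_changed_angle_to_radians := by
  unfold Claim_changed_angle_to_radians; decide

theorem angle_to_radians_tight : Claim_exact_angle_to_radians := by
  intro angle _ hd
  rw [angle_to_radians_eq_of_dvd angle hd, angle_to_radians_alt_eq_of_dvd angle hd]
  exact append_ne_of_last_ne _ _
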